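-- pv_equiv track=rewrite | github.com/Shurke/pt1-47-22 | src/old_tasks/task13.py | word_with_elem
-- ===== SOURCE A (Python) =====
-- def word_with_elem(word: str, sequence: list) -> str:
--     """Trying to make a /silicon/ from elements in /sequence/
--
--     Return SiLiCoN or empty string if this is not possible.
--
--     :param word: input word to select elements (Silicon -> SiLiCoNe)
--     :param sequence: the sequence from which the word will be composed.
--     :return: Composed word (like a SiLiCoNe)
--     """
--     try_list = [False for x in range(0, len(word) + 1)]
--     try_list[0] = []
--     for i in range(1, len(word) + 1):
--         variants = []
--         for index in range(max(i - 3, 0), i):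
--             if try_list[index] is False:  # variability
--                 continue
--             potential_element = word[index:i].title()  # for search in seq
--             if potential_element in sequence:
--                 variants.append(try_list[index] + [potential_element])
--         if variants:
--             try_list[i] = min(variants, key=len)
--     if try_list[-1] is False:
--         result = ''
--     else:
--         result = "".join(try_list[-1])
--
--     return result
-- ===== SOURCE B (Python) =====
-- def word_with_elem(word: str, sequence: list) -> str:
--     """Compose /word/ from 1-3 letter elements of /sequence/ (fewest pieces).
--
--     Forward DP over prefix lengths keeping only a piece count and a
--     back-pointer per position, then a separate reconstruction walk.
--     """
--     n = len(word)
--     count = [None] * (n + 1)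
--     parent = [0] * (n + 1)
--     count[0] = 0
--     for i in range(1, n + 1):
--         for j in range(max(i - 3, 0), i):
--             if count[j] is None:
--                 continue
--             chunk = word[j:i].title()
--             if chunk in sequence and (count[i] is None or count[j] + 1 < count[i]):
--                 count[i] = count[j] + 1
--                 parent[i] = j
--     if count[n] is None:
--         return ''
--     parts = []
--     pos = n
--     while pos > 0:
--         j = parent[pos]
--         parts.append(word[j:pos].title())
--         pos = j
--     return ''.join(reversed(parts))
-- ===== Notes on version B (the rewrite author's own statement) =====
-- stated objective: alternative
-- what changed: Replaces the DP that stores, per prefix position, the whole list of chunks (building a variants list and taking min by length) by a DP that stores only a piece count and a back-pointer per position (strict-less update on an ascending scan, so ties keep the smallest index exactly like min's first-minimum rule), followed by a separate back-pointer reconstruction walk.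
import Mathlib
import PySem

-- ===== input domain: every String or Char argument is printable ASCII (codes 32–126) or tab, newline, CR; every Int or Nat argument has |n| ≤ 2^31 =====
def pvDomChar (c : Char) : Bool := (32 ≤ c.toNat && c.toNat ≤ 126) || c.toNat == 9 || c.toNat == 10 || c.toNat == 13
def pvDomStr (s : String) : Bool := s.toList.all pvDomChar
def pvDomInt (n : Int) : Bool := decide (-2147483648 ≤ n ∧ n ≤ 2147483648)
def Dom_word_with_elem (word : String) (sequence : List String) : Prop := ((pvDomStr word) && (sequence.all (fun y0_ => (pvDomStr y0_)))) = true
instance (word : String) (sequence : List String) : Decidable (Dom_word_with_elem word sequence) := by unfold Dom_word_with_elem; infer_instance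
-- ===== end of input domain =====

-- B replaces A's DP that stores whole chunk-lists per position (variants list + min by
-- length) by a count/back-pointer DP with a separate reconstruction walk.

-- Shared hand-ported primitive: Python str.title(); exact on ASCII, where the cased
-- characters are exactly the alphabetic ones (uppercase after a non-letter, else lowercase).
def pvTitleGo : Bool → List Char → List Char
  | _, [] => []
  | prev, c :: cs =>
    (if PySem.Chars.isalpha c then
        (if prev then PySem.Chars.lowerChar c else PySem.Chars.upperChar c)
      else c) :: pvTitleGo (PySem.Chars.isalpha c) cs

def pvTitle (cs : List Char) : List Char := pvTitleGo false cs

-- ===== PORT A =====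
-- word[index:i].title() with 0 ≤ index ≤ i: drop/take is exact for these nonnegative bounds.
-- range(max(i-3,0), i) = List.range' (i-3) (i-(i-3)) (Nat subtraction clamps at 0).
def wweVariants (w : List Char) (seq : List (List Char))
    (tl : List (Option (List (List Char)))) (i : Nat) : List (List (List Char)) :=
  (List.range' (i - 3) (i - (i - 3))).foldl
    (fun vs j =>
      match tl.getD j none with
      | none => vs
      | some prev =>
        let pe := pvTitle ((w.drop j).take (i - j))
        if pe ∈ seq then vs ++ [prev ++ [pe]] else vs)
    []

def wweStep (w : List Char) (seq : List (List Char))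
    (tl : List (Option (List (List Char)))) (i : Nat) : List (Option (List (List Char))) :=
  let variants := wweVariants w seq tl i
  if variants = [] then tl
  else tl.set i (PySem.List.min? variants (fun v => v.length))   -- min(variants, key=len)

def word_with_elem (word : String) (sequence : List String) : String :=
  let w := word.toList
  let seq := sequence.map String.toList
  let n := w.length
  -- try_list = [False]*(n+1); try_list[0] = []   (False ↦ none, a list ↦ some)
  let tl0 := ((List.range (n + 1)).map (fun _ => (none : Option (List (List Char))))).set 0 (some [])
  let tl := (List.range' 1 n).foldl (wweStep w seq) tl0   -- for i in range(1, n+1)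
  match PySem.List.pyGetD tl (-1) none with   -- try_list[-1]
  | none => ""
  | some parts => String.ofList (PySem.Chars.join [] parts)   -- "".join(...)

-- ===== PORT B =====
def wweAltInner (w : List Char) (seq : List (List Char)) (i : Nat)
    (st : List (Option Nat) × List Nat) (j : Nat) : List (Option Nat) × List Nat :=
  match st.1.getD j none with
  | none => st
  | some cj =>
    let chunk := pvTitle ((w.drop j).take (i - j))
    if chunk ∈ seq then
      match st.1.getD i none with
      | none => (st.1.set i (some (cj + 1)), st.2.set i j)
      | some ci => if cj + 1 < ci then (st.1.set i (some (cj + 1)), st.2.set i j) else st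
    else st

def wweAltStep (w : List Char) (seq : List (List Char))
    (st : List (Option Nat) × List Nat) (i : Nat) : List (Option Nat) × List Nat :=
  (List.range' (i - 3) (i - (i - 3))).foldl (wweAltInner w seq i) st

-- the `while pos > 0` reconstruction walk; fuel n+1 bounds it (pos strictly decreases)
def wweAltBuild (w : List Char) (par : List Nat) :
    Nat → Nat → List (List Char) → List (List Char)
  | 0, _, parts => parts
  | fuel + 1, pos, parts =>
    if 0 < pos then
      let j := par.getD pos 0
      wweAltBuild w par fuel j (parts ++ [pvTitle ((w.drop j).take (pos - j))])
    else parts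

def word_with_elem_alt (word : String) (sequence : List String) : String :=
  let w := word.toList
  let seq := sequence.map String.toList
  let n := w.length
  let cnt0 := ((List.range (n + 1)).map (fun _ => (none : Option Nat))).set 0 (some 0)
  let par0 := (List.range (n + 1)).map (fun _ => 0)
  let st := (List.range' 1 n).foldl (wweAltStep w seq) (cnt0, par0)
  match st.1.getD n none with
  | none => ""
  | some _ =>
    let parts := wweAltBuild w st.2 (n + 1) n []
    String.ofList (PySem.Chars.join [] parts.reverse)   -- "".join(reversed(parts))

-- ===== PRECONDITION & SPEC =====
def Spec_word_with_elem (word : String) (sequence : List String) (out : String) : Prop := out = word_with_elem_alt word sequence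
instance (word : String) (sequence : List String) (out : String) : Decidable (Spec_word_with_elem word sequence out) := by unfold Spec_word_with_elem; infer_instance

-- ===== CLAIM =====
def Claim_equal_word_with_elem : Prop := ∀ (word : String) (sequence : List String), Dom_word_with_elem word sequence → Spec_word_with_elem word sequence (word_with_elem word sequence)

-- ===== LEMMAS AND PROOFS =====
def pvCand (w : List Char) (j i : Nat) : List Char := pvTitle ((w.drop j).take (i - j))

-- joint invariant after processing i = 1..m
def pvInv (w : List Char) (n m : Nat) (tl : List (Option (List (List Char))))
    (cnt : List (Option Nat)) (par : List Nat) : Prop :=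
  tl.length = n + 1 ∧ cnt.length = n + 1 ∧ par.length = n + 1 ∧
  tl.getD 0 none = some [] ∧
  (∀ k, m < k → tl.getD k none = none) ∧
  (∀ k, cnt.getD k none = (tl.getD k none).map List.length) ∧
  (∀ k l, 1 ≤ k → tl.getD k none = some l →
     par.getD k 0 < k ∧ ∃ l', tl.getD (par.getD k 0) none = some l' ∧
       l = l' ++ [pvCand w (par.getD k 0) k])

theorem pv_getD_set_self {α : Type} (l : List α) (i : Nat) (a d : α) (h : i < l.length) :
    (l.set i a).getD i d = a := by
  simp [List.getD_eq_getElem?_getD, List.getElem?_set_self h]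

theorem pv_getD_set_ne {α : Type} (l : List α) (i j : Nat) (a d : α) (h : i ≠ j) :
    (l.set i a).getD j d = l.getD j d := by
  simp [List.getD_eq_getElem?_getD, List.getElem?_set_ne h]

theorem pv_getD_set_self' {α : Type} (l : List α) (i : Nat) (a d : α) (h : i < l.length) :
    ((l.set i a)[i]?).getD d = a := by
  simp [List.getElem?_set_self h]

theorem pv_getD_set_ne' {α : Type} (l : List α) (i j : Nat) (a d : α) (h : i ≠ j) :
    ((l.set i a)[j]?).getD d = (l[j]?).getD d := by
  simp [List.getElem?_set_ne h]

theorem pv_min?_append_singleton {α : Type} (xs : List α) (v : α) (key : α → Nat) :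
    PySem.List.min? (xs ++ [v]) key =
      match PySem.List.min? xs key with
      | none => some v
      | some m => if key v < key m then some v else some m := by
  rw [PySem.List.min?, List.foldl_append]
  cases h : PySem.List.min? xs key with
  | none => rw [PySem.List.min?] at h; simp [h]
  | some m => rw [PySem.List.min?] at h; simp [h]

-- the inner loop: A's variants/min? fold and B's streaming best agree
theorem pv_inner (w : List Char) (seq : List (List Char))
    (tl : List (Option (List (List Char)))) (cnt : List (Option Nat)) (par : List Nat)
    (i n : Nat) (hi : i ≤ n) (hc : cnt.length = n + 1) (hp : par.length = n + 1)
    (hmap : ∀ k, cnt.getD k none = (tl.getD k none).map List.length)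
    (hti : tl.getD i none = none)
    (js : List Nat) (hjs : ∀ j ∈ js, j < i) :
    (js.foldl (fun vs j =>
        match tl.getD j none with
        | none => vs
        | some prev =>
          let pe := pvTitle ((w.drop j).take (i - j))
          if pe ∈ seq then vs ++ [prev ++ [pe]] else vs) [] = [] ∧
      js.foldl (wweAltInner w seq i) (cnt, par) = (cnt, par)) ∨
    (∃ jstar lstar, jstar < i ∧ tl.getD jstar none = some lstar ∧
      PySem.List.min? (js.foldl (fun vs j =>
        match tl.getD j none with
        | none => vs
        | some prev =>
          let pe := pvTitle ((w.drop j).take (i - j))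
          if pe ∈ seq then vs ++ [prev ++ [pe]] else vs) []) (fun v => v.length) =
        some (lstar ++ [pvCand w jstar i]) ∧
      js.foldl (wweAltInner w seq i) (cnt, par) =
        (cnt.set i (some (lstar.length + 1)), par.set i jstar)) := by
  simp only [List.getD_eq_getElem?_getD] at hmap hti ⊢
  induction js using List.reverseRecOn with
  | nil => exact Or.inl ⟨rfl, rfl⟩
  | append_singleton js j ih =>
    have hj : j < i := hjs j (by simp)
    have hci : i < cnt.length := by omega
    have hpi : i < par.length := by omega
    have hij : i ≠ j := by omega
    rcases ih (fun x hx => hjs x (List.mem_append_left _ hx)) with ⟨hvs, hst⟩ |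
      ⟨jstar, lstar, hjst, htst, hmin, hst⟩
    · rw [List.foldl_append, List.foldl_append, hvs, hst]
      simp only [List.foldl_cons, List.foldl_nil]
      cases h : (tl[j]?).getD none with
      | none =>
        left
        refine ⟨by simp, ?_⟩
        have hmj := hmap j; rw [h] at hmj
        simp [wweAltInner, List.getD_eq_getElem?_getD, hmj]
      | some l =>
        have hmj := hmap j; rw [h] at hmj
        have hmi := hmap i; rw [hti] at hmi
        by_cases hpe : pvTitle ((w.drop j).take (i - j)) ∈ seq
        · right
          refine ⟨j, l, hj, h, ?_, ?_⟩
          · simp [hpe, PySem.List.min?, pvCand]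
          · simp [wweAltInner, List.getD_eq_getElem?_getD, hmj, hmi, hpe]
        · left
          refine ⟨by simp [hpe], ?_⟩
          simp [wweAltInner, List.getD_eq_getElem?_getD, hmj, hpe]
    · rw [List.foldl_append, List.foldl_append, hst]
      simp only [List.foldl_cons, List.foldl_nil]
      have hgj : ((cnt.set i (some (lstar.length + 1)))[j]?).getD none = (cnt[j]?).getD none :=
        pv_getD_set_ne' _ _ _ _ _ hij
      have hgi : ((cnt.set i (some (lstar.length + 1)))[i]?).getD none = some (lstar.length + 1) :=
        pv_getD_set_self' _ _ _ _ hci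
      cases h : (tl[j]?).getD none with
      | none =>
        right
        refine ⟨jstar, lstar, hjst, htst, by simpa [h] using hmin, ?_⟩
        have hmj := hmap j; rw [h] at hmj; rw [← hgj] at hmj
        simp [wweAltInner, List.getD_eq_getElem?_getD, hmj]
      | some l =>
        have hmj := hmap j; rw [h] at hmj; rw [← hgj] at hmj
        by_cases hpe : pvTitle ((w.drop j).take (i - j)) ∈ seq
        · by_cases hlt : l.length + 1 < lstar.length + 1
          · right
            refine ⟨j, l, hj, h, ?_, ?_⟩
            · simp only [hpe, if_pos]
              rw [pv_min?_append_singleton, hmin]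
              have hkey : (l ++ [pvTitle ((w.drop j).take (i - j))]).length
                  < (lstar ++ [pvCand w jstar i]).length := by simp; omega
              simp [pvCand]
              intro hle
              exact absurd hle (by omega)
            · simp only [wweAltInner, List.getD_eq_getElem?_getD, hmj, hgi]
              simp [hpe, hlt, List.set_set]
          · right
            refine ⟨jstar, lstar, hjst, htst, ?_, ?_⟩
            · simp only [hpe, if_pos]
              rw [pv_min?_append_singleton, hmin]
              have hkey : ¬ (l ++ [pvTitle ((w.drop j).take (i - j))]).length
                  < (lstar ++ [pvCand w jstar i]).length := by simp; omega
              simp only [if_neg hkey]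
            · simp only [wweAltInner, List.getD_eq_getElem?_getD, hmj, hgi]
              simp [hpe, hlt]
        · right
          refine ⟨jstar, lstar, hjst, htst, by simpa [h, hpe] using hmin, ?_⟩
          simp [wweAltInner, List.getD_eq_getElem?_getD, hmj, hpe]

-- one outer step preserves the invariant
theorem pv_step (w : List Char) (seq : List (List Char)) (n m : Nat)
    (tl : List (Option (List (List Char)))) (cnt : List (Option Nat)) (par : List Nat)
    (hm : m < n) (h : pvInv w n m tl cnt par) :
    pvInv w n (m + 1) (wweStep w seq tl (m + 1))
      (wweAltStep w seq (cnt, par) (m + 1)).1 (wweAltStep w seq (cnt, par) (m + 1)).2 := by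
  obtain ⟨hlt, hlc, hlp, h0, hnone, hmap, hpar⟩ := h
  have hti : tl.getD (m + 1) none = none := hnone (m + 1) (by omega)
  have hjs : ∀ j ∈ List.range' (m + 1 - 3) ((m + 1) - (m + 1 - 3)), j < m + 1 := by
    intro j hj
    have := List.mem_range'_1.mp hj
    omega
  rcases pv_inner w seq tl cnt par (m + 1) n (by omega) hlc hlp hmap hti
      (List.range' (m + 1 - 3) ((m + 1) - (m + 1 - 3))) hjs with ⟨hvs, hst⟩ |
    ⟨jstar, lstar, hjst, htst, hmin, hst⟩
  · unfold wweStep wweAltStep wweVariants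
    rw [hvs, hst]
    simp only [if_pos]
    exact ⟨hlt, hlc, hlp, h0, fun k hk => hnone k (by omega), hmap, hpar⟩
  · have hvs : wweVariants w seq tl (m + 1) ≠ [] := by
      intro e
      unfold wweVariants at e
      rw [e] at hmin
      simp [PySem.List.min?] at hmin
    have hmin' : PySem.List.min? (wweVariants w seq tl (m + 1)) (fun v => v.length) =
        some (lstar ++ [pvCand w jstar (m + 1)]) := hmin
    unfold wweStep wweAltStep
    rw [hst, if_neg hvs, hmin']
    have hiS : m + 1 < tl.length := by omega
    have hiC : m + 1 < cnt.length := by omega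
    have hiP : m + 1 < par.length := by omega
    refine ⟨by simp [hlt], by simp [hlc], by simp [hlp], ?_, ?_, ?_, ?_⟩
    · rw [pv_getD_set_ne _ _ _ _ _ (by omega)]; exact h0
    · intro k hk
      rw [pv_getD_set_ne _ _ _ _ _ (by omega)]
      exact hnone k (by omega)
    · intro k
      by_cases hki : k = m + 1
      · subst hki
        rw [pv_getD_set_self _ _ _ _ hiC, pv_getD_set_self _ _ _ _ hiS]
        simp
      · rw [pv_getD_set_ne _ _ _ _ _ (Ne.symm hki), pv_getD_set_ne _ _ _ _ _ (Ne.symm hki)]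
        exact hmap k
    · intro k l hk htlk
      by_cases hki : k = m + 1
      · subst hki
        rw [pv_getD_set_self _ _ _ _ hiS] at htlk
        rw [pv_getD_set_self _ _ _ _ hiP]
        refine ⟨hjst, lstar, ?_, by injection htlk with e; exact e.symm⟩
        rw [pv_getD_set_ne _ _ _ _ _ (by omega)]
        exact htst
      · rw [pv_getD_set_ne _ _ _ _ _ (Ne.symm hki)] at htlk
        have hkm : k ≤ m := by
          by_contra hkm
          rw [hnone k (by omega)] at htlk
          simp at htlk
        obtain ⟨hplt, l', htl', hl⟩ := hpar k l hk htlk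
        rw [pv_getD_set_ne _ _ _ _ _ (Ne.symm hki)]
        refine ⟨hplt, l', ?_, hl⟩
        rw [pv_getD_set_ne _ _ _ _ _ (by omega)]
        exact htl'

theorem pv_getD_const {α : Type} (c : α) (N k : Nat) (d : α) :
    ((List.range N).map (fun _ => c)).getD k d = if k < N then c else d := by
  by_cases h : k < N
  · simp [List.getD_eq_getElem?_getD, h]
  · rw [List.getD_eq_getElem?_getD,
      List.getElem?_eq_none (by simpa using Nat.le_of_not_lt h)]
    simp [h]

-- the invariant holds after the whole outer loop
theorem pv_main (w : List Char) (seq : List (List Char)) (n m : Nat) (hm : m ≤ n)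
    (hn : n = w.length) :
    pvInv w n m
      ((List.range' 1 m).foldl (wweStep w seq)
        (((List.range (n + 1)).map (fun _ => (none : Option (List (List Char))))).set 0 (some [])))
      ((List.range' 1 m).foldl (wweAltStep w seq)
        ((((List.range (n + 1)).map (fun _ => (none : Option Nat))).set 0 (some 0)),
          (List.range (n + 1)).map (fun _ => 0))).1
      ((List.range' 1 m).foldl (wweAltStep w seq)
        ((((List.range (n + 1)).map (fun _ => (none : Option Nat))).set 0 (some 0)),
          (List.range (n + 1)).map (fun _ => 0))).2 := by
  induction m with
  | zero =>
    simp only [show List.range' 1 0 = [] from rfl, List.foldl_nil]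
    refine ⟨by simp, by simp, by simp, ?_, ?_, ?_, ?_⟩
    · rw [pv_getD_set_self _ _ _ _ (by simp)]
    · intro k hk
      rw [pv_getD_set_ne _ _ _ _ _ (by omega), pv_getD_const]
      simp
    · intro k
      by_cases hk0 : k = 0
      · subst hk0
        rw [pv_getD_set_self _ _ _ _ (by simp), pv_getD_set_self _ _ _ _ (by simp)]
        rfl
      · rw [pv_getD_set_ne _ _ _ _ _ (Ne.symm hk0), pv_getD_set_ne _ _ _ _ _ (Ne.symm hk0),
          pv_getD_const, pv_getD_const]
        simp
    · intro k l hk htlk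
      rw [pv_getD_set_ne _ _ _ _ _ (by omega), pv_getD_const] at htlk
      simp at htlk
  | succ m ih =>
    have hm : m < n := by omega
    have h := pv_step w seq n m _ _ _ hm (ih (by omega))
    have hone : (1 : Nat) + 1 * m = m + 1 := by omega
    rw [List.range'_concat, List.foldl_append, List.foldl_append]
    simp only [List.foldl_cons, List.foldl_nil, hone]
    convert h using 2

-- back-pointer reconstruction returns A's stored chunk list (reversed onto acc)
theorem pv_build (w : List Char) (tl : List (Option (List (List Char)))) (par : List Nat)
    (h0 : tl.getD 0 none = some [])
    (hpar : ∀ k l, 1 ≤ k → tl.getD k none = some l →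
      par.getD k 0 < k ∧ ∃ l', tl.getD (par.getD k 0) none = some l' ∧
        l = l' ++ [pvCand w (par.getD k 0) k]) :
    ∀ k fuel acc l, k ≤ fuel → tl.getD k none = some l →
      wweAltBuild w par fuel k acc = acc ++ l.reverse := by
  intro k
  induction k using Nat.strong_induction_on with
  | _ k ih =>
    intro fuel acc l hkf htl
    cases k with
    | zero =>
      rw [h0] at htl
      injection htl with e
      subst e
      cases fuel <;> simp [wweAltBuild]
    | succ k' =>
      obtain ⟨hplt, l', htl', hl⟩ := hpar (k' + 1) l (by omega) htl
      cases fuel with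
      | zero => omega
      | succ f =>
        simp only [wweAltBuild, if_pos (by omega : 0 < k' + 1)]
        rw [ih (par.getD (k' + 1) 0) hplt f _ l' (by omega) htl']
        subst hl
        simp [pvCand]

theorem pv_pyGetD_neg_one_eq {α : Type} (l : List α) (n : Nat) (d : α) (h : l.length = n + 1) :
    PySem.List.pyGetD l (-1) d = l.getD n d := by
  have hne : l ≠ [] := by intro e; rw [e] at h; simp at h
  rw [PySem.List.pyGetD_neg_one l d hne]
  rw [List.getLast_eq_getElem]
  rw [List.getD_eq_getElem?_getD, List.getElem?_eq_getElem (by omega : n < l.length)]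
  simp [h]

-- ===== VERDICT =====
theorem word_with_elem_spec : Claim_equal_word_with_elem := by
  intro word sequence _dom
  show word_with_elem word sequence = word_with_elem_alt word sequence
  unfold word_with_elem word_with_elem_alt
  simp only []
  obtain ⟨hlt, hlc, hlp, h0, hnone, hmap, hpar⟩ :=
    pv_main word.toList (sequence.map String.toList) word.toList.length word.toList.length
      le_rfl rfl
  rw [pv_pyGetD_neg_one_eq _ word.toList.length none hlt]
  have hm := hmap word.toList.length
  cases htn : (List.foldl (wweStep word.toList (sequence.map String.toList))
      (((List.range (word.toList.length + 1)).map
        (fun _ => (none : Option (List (List Char))))).set 0 (some []))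
      (List.range' 1 word.toList.length)).getD word.toList.length none with
  | none =>
    rw [htn, Option.map_none] at hm
    rw [hm]
  | some l =>
    rw [htn, Option.map_some] at hm
    rw [hm]
    rw [pv_build word.toList _ _ h0 hpar word.toList.length (word.toList.length + 1) [] l
      (by omega) htn]
    simp
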